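-- pv_equiv track=rewrite | github.com/liupengsay/PyIsTheBestLang | src/math/mex_like/problem.py | lc_330
-- ===== SOURCE A (Python) =====
-- from typing import List
--
-- def lc_330(nums: List[int], n: int) -> int:
--     """
--     url: https://leetcode.cn/problems/patching-array/
--     tag: greedy|sort|implemention|mex|classical
--     """
--     nums.sort()
--     m = len(nums)
--     i = 0
--     mex = 1
--     ans = 0
--     while mex <= n:
--         if i < m and nums[i] <= mex:
--             mex += nums[i]
--             i += 1
--         else:
--             ans += 1
--             mex *= 2
--     return ans
-- ===== SOURCE B (Python) =====
-- def lc_330(nums, n):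
--     # Same task, different algorithm: instead of doubling mex one step per loop
--     # iteration, compute each run of patches in closed form with int.bit_length
--     # (patches needed to reach x from mex = bit_length((x-1)//mex), capped by the
--     # patches that push mex past n). nums is sorted in place, like A.
--     nums.sort()
--     ans = 0
--     mex = 1
--     for x in nums:
--         if mex > n:
--             break
--         if x > mex:
--             t1 = ((x + mex - 1) // mex - 1).bit_length()
--             t2 = (n // mex).bit_length()
--             if t2 <= t1:
--                 return ans + t2
--             ans += t1
--             mex <<= t1
--         mex += x
--     if mex <= n:
--         ans += (n // mex).bit_length()
--     return ans
-- ===== Notes on version B (the rewrite author's own statement) =====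
-- stated objective: alternative
-- what changed: A's patch steps double mex one loop iteration at a time; B has no doubling loop at all: for each too-large element it computes the whole run of patches in closed form with int.bit_length (bit_length((x-1)//mex), capped by bit_length(n//mex)) and applies it as one shift, with the final run also computed in closed form; both sort nums in place and the equivalence is about the return value.
import Mathlib
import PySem

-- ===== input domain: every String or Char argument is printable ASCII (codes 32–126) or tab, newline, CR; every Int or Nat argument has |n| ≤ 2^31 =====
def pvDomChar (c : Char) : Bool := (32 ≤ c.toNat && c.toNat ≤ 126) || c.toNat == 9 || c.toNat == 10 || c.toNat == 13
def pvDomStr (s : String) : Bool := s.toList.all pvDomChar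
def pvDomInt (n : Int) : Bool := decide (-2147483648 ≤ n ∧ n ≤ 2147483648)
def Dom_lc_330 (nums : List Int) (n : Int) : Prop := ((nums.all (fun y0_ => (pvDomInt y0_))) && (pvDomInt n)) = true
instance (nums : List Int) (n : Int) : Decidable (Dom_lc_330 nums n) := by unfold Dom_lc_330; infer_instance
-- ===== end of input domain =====

-- B removes A's step-by-step doubling loop: each run of patches is computed in closed form with
-- int.bit_length and applied as one shift (alternative algorithm, similar cost). Both Pythons
-- sort nums in place; the equivalence proved is about the return value.

-- ===== PORT A =====
-- A's while loop over index i into the sorted array, ported as consumption of the sorted list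
-- (i < m ↔ list nonempty, nums[i] ↔ head).  The Nat argument is a totality guard (fuel) only:
-- within Pre_ and Dom the initial fuel is never exhausted (mex ≥ 1 doubles towards n ≤ 2^31),
-- which the equivalence lemmas below prove; outside Pre_ the Python loops forever.
def lc330_loopA (n : Int) : Nat → List Int → Int → Int → Int
  | 0, _, _, ans => ans
  | fuel + 1, l, mex, ans =>
    if mex ≤ n then
      match l with
      | x :: rest =>
        if x ≤ mex then lc330_loopA n fuel rest (mex + x) ans
        else lc330_loopA n fuel (x :: rest) (mex * 2) (ans + 1)
      | [] => lc330_loopA n fuel [] (mex * 2) (ans + 1)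
    else ans

def lc_330 (nums : List Int) (n : Int) : Int :=
  let s := PySem.List.sorted nums (fun x => x) false
  lc330_loopA n (s.length + 64) s 1 0

-- ===== PORT B =====
-- Source B's for loop: Sum.inl = the early 'return ans + t2', Sum.inr = falling off the loop
-- (whether by break or exhaustion) with the final (mex, ans).
def lc330_forB (n : Int) : List Int → Int → Int → Int ⊕ (Int × Int)
  | [], mex, ans => Sum.inr (mex, ans)
  | x :: rest, mex, ans =>
    if n < mex then Sum.inr (mex, ans)
    else if mex < x then
      let t1 := PySem.Int.bitLength (PySem.Int.floordiv (x + mex - 1) mex - 1)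
      let t2 := PySem.Int.bitLength (PySem.Int.floordiv n mex)
      if t2 ≤ t1 then Sum.inl (ans + (t2 : Int))
      else lc330_forB n rest (mex * 2 ^ t1 + x) (ans + (t1 : Int))
    else lc330_forB n rest (mex + x) ans

def lc_330_alt (nums : List Int) (n : Int) : Int :=
  let s := PySem.List.sorted nums (fun x => x) false
  match lc330_forB n s 1 0 with
  | Sum.inl ans => ans
  | Sum.inr (mex, ans) =>
    if mex ≤ n then ans + (PySem.Int.bitLength (PySem.Int.floordiv n mex) : Int) else ans

-- ===== PRECONDITION & SPEC =====
-- Pre_ excludes exactly the inputs on which Python A loops forever (n ≥ 1 together with a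
-- negative element makes mex nonpositive and the loop never ends); A returns on all other inputs.
def Pre_lc_330 (nums : List Int) (n : Int) : Prop := n ≤ 0 ∨ ∀ x ∈ nums, 0 ≤ x
instance (nums : List Int) (n : Int) : Decidable (Pre_lc_330 nums n) := by unfold Pre_lc_330; infer_instance
def pvWitness_lc_330 : List Int × Int := ([1, 3], 6)

def Spec_lc_330 (nums : List Int) (n : Int) (out : Int) : Prop := out = lc_330_alt nums n
instance (nums : List Int) (n : Int) (out : Int) : Decidable (Spec_lc_330 nums n out) := by unfold Spec_lc_330; infer_instance

-- ===== CLAIM =====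
def Claim_equal_lc_330 : Prop := ∀ (nums : List Int) (n : Int), Dom_lc_330 nums n → Pre_lc_330 nums n → Spec_lc_330 nums n (lc_330 nums n)

-- ===== LEMMAS AND PROOFS =====

-- the value B's function extracts from a loop result
def lc330_finB (n : Int) : Int ⊕ (Int × Int) → Int
  | Sum.inl ans => ans
  | Sum.inr (mex, ans) =>
    if mex ≤ n then ans + (PySem.Int.bitLength (PySem.Int.floordiv n mex) : Int) else ans

-- abbreviation used throughout the proofs: number of doublings computed by bit_length
def lc330_T (m mex : Int) : Nat := PySem.Int.bitLength (PySem.Int.floordiv m mex)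

-- single-step unfolding lemmas (definitional) for A's fueled loop
theorem lc330_loopA_step_cons (n : Int) (f : Nat) (x : Int) (rest : List Int) (mex ans : Int) :
    lc330_loopA n (f + 1) (x :: rest) mex ans
      = if mex ≤ n then
          (if x ≤ mex then lc330_loopA n f rest (mex + x) ans
           else lc330_loopA n f (x :: rest) (mex * 2) (ans + 1))
        else ans := rfl

theorem lc330_loopA_step_nil (n : Int) (f : Nat) (mex ans : Int) :
    lc330_loopA n (f + 1) [] mex ans
      = if mex ≤ n then lc330_loopA n f [] (mex * 2) (ans + 1) else ans := rfl

-- bit_length ≤ t ↔ value < 2^t, for nonnegative values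
theorem lc330_bl_le_iff (q : Int) (hq : 0 ≤ q) (t : Nat) :
    PySem.Int.bitLength q ≤ t ↔ q < 2 ^ t := by
  have h2 : ((2:Int) ^ t) = ((2 ^ t : Nat) : Int) := by push_cast; ring
  constructor
  · intro h
    have h1 := PySem.Int.lt_two_pow_bitLength q
    have h3 : q.natAbs < 2 ^ t := lt_of_lt_of_le h1 (Nat.pow_le_pow_right (by norm_num) h)
    rw [← Int.natAbs_of_nonneg hq, h2]
    exact_mod_cast h3
  · intro h
    by_cases h0 : q = 0
    · subst h0; simp [PySem.Int.bitLength_zero]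
    · have hlo := PySem.Int.two_pow_bitLength_le q h0
      have hqn : q.natAbs < 2 ^ t := by
        rw [← Int.natAbs_of_nonneg hq, h2] at h; exact_mod_cast h
      have h4 : 2 ^ (PySem.Int.bitLength q - 1) < 2 ^ t := lt_of_le_of_lt hlo hqn
      have h5 := (Nat.pow_lt_pow_iff_right (by norm_num : 1 < 2)).1 h4
      omega

-- the central bound: T m mex ≤ t ↔ m < mex * 2^t
theorem lc330_bnd (m mex : Int) (t : Nat) (hm : 1 ≤ mex) (hmm : 0 ≤ m) :
    lc330_T m mex ≤ t ↔ m < mex * 2 ^ t := by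
  have hm0 : (0:Int) < mex := by omega
  have hfd0 : 0 ≤ PySem.Int.floordiv m mex := by
    have := (PySem.Int.le_floordiv_iff_mul_le (a := m) (q := 0) hm0)
    simp at this
    omega
  unfold lc330_T
  rw [lc330_bl_le_iff _ hfd0 t, PySem.Int.floordiv_lt_iff_lt_mul hm0, mul_comm]

theorem lc330_T_pos (m mex : Int) (hm : 1 ≤ mex) (h : mex ≤ m) : 1 ≤ lc330_T m mex := by
  have hb := lc330_bnd m mex 0 hm (by omega)
  simp only [pow_zero, mul_one] at hb
  omega

theorem lc330_T_double (m mex : Int) (hm : 1 ≤ mex) (h : mex * 2 ≤ m) :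
    lc330_T m mex = lc330_T m (mex * 2) + 1 := by
  have h0 : 0 ≤ m := by omega
  have hp : 1 ≤ lc330_T m mex := lc330_T_pos m mex hm (by omega)
  have h1 : lc330_T m mex ≤ lc330_T m (mex * 2) + 1 := by
    rw [lc330_bnd m mex _ hm h0]
    have h2 := (lc330_bnd m (mex * 2) (lc330_T m (mex * 2)) (by omega) h0).1 (le_refl _)
    rw [pow_succ]
    linarith
  have h3 : lc330_T m (mex * 2) ≤ lc330_T m mex - 1 := by
    rw [lc330_bnd m (mex * 2) _ (by omega) h0]
    have h4 := (lc330_bnd m mex (lc330_T m mex) hm h0).1 (le_refl _)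
    have h5 : lc330_T m mex = (lc330_T m mex - 1) + 1 := by omega
    rw [h5, pow_succ] at h4
    linarith
  omega

-- the port's ceiling expression equals (x-1) // mex
theorem lc330_ceil_eq (x mex : Int) (hm : 0 < mex) :
    PySem.Int.floordiv (x + mex - 1) mex - 1 = PySem.Int.floordiv (x - 1) mex := by
  rw [PySem.Int.floordiv_eq_ediv_of_pos hm, PySem.Int.floordiv_eq_ediv_of_pos hm]
  have h1 : x + mex - 1 = (x - 1) + 1 * mex := by ring
  rw [h1, Int.add_mul_ediv_right _ _ (by omega : mex ≠ 0)]
  ring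

-- A's loop on the empty list, in closed form
theorem lc330_loopA_nil (n : Int) :
    ∀ (fuel : Nat) (mex ans : Int), 1 ≤ mex → n < mex * 2 ^ fuel →
      lc330_loopA n fuel [] mex ans
        = if mex ≤ n then ans + (lc330_T n mex : Int) else ans := by
  intro fuel
  induction fuel with
  | zero =>
    intro mex ans hm hb
    simp only [pow_zero, mul_one] at hb
    rw [if_neg (by omega)]
    rfl
  | succ f ih =>
    intro mex ans hm hb
    rw [lc330_loopA_step_nil]
    by_cases hc : mex ≤ n
    · rw [if_pos hc, if_pos hc]
      have hn0 : 0 ≤ n := by omega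
      have hb2 : n < mex * 2 * 2 ^ f := by rw [mul_assoc, mul_comm 2 (2 ^ f), ← pow_succ]; exact hb
      rw [ih (mex * 2) (ans + 1) (by omega) hb2]
      by_cases hc2 : mex * 2 ≤ n
      · rw [if_pos hc2, lc330_T_double n mex hm hc2]
        push_cast; ring
      · rw [if_neg hc2]
        have ht2le : lc330_T n mex ≤ 1 := by
          rw [lc330_bnd n mex 1 hm hn0, pow_one]; omega
        have ht2p : 1 ≤ lc330_T n mex := lc330_T_pos n mex hm hc
        have : lc330_T n mex = 1 := by omega
        rw [this]; push_cast; ring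
    · rw [if_neg hc, if_neg hc]

-- B's loop value is invariant under one patch step
theorem lc330_finB_double (n x : Int) (rest : List Int) (mex ans : Int)
    (hm : 1 ≤ mex) (hle : mex ≤ n) (hx : mex < x) :
    lc330_finB n (lc330_forB n (x :: rest) mex ans)
      = lc330_finB n (lc330_forB n (x :: rest) (mex * 2) (ans + 1)) := by
  have hm0 : (0:Int) < mex := by omega
  have hn0 : 0 ≤ n := by omega
  have hx1 : mex ≤ x - 1 := by omega
  have ht1e : PySem.Int.bitLength (PySem.Int.floordiv (x + mex - 1) mex - 1)
      = lc330_T (x - 1) mex := by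
    rw [lc330_ceil_eq x mex hm0]; rfl
  have ht1e2 : PySem.Int.bitLength (PySem.Int.floordiv (x + mex * 2 - 1) (mex * 2) - 1)
      = lc330_T (x - 1) (mex * 2) := by
    rw [lc330_ceil_eq x (mex * 2) (by omega)]; rfl
  have hT2 : PySem.Int.bitLength (PySem.Int.floordiv n mex) = lc330_T n mex := rfl
  have hT2' : PySem.Int.bitLength (PySem.Int.floordiv n (mex * 2)) = lc330_T n (mex * 2) := rfl
  have ht1p : 1 ≤ lc330_T (x - 1) mex := lc330_T_pos (x - 1) mex hm hx1
  have ht2p : 1 ≤ lc330_T n mex := lc330_T_pos n mex hm hle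
  simp only [lc330_forB, ht1e, ht1e2, hT2, hT2']
  rw [if_neg (show ¬ n < mex by omega), if_pos hx]
  by_cases hcase : n < mex * 2
  · -- one patch pushes mex past n : both sides end with ans + 1
    have ht2e : lc330_T n mex = 1 := by
      have h := (lc330_bnd n mex 1 hm hn0).2 (by rw [pow_one]; omega)
      omega
    rw [if_pos (show lc330_T n mex ≤ lc330_T (x - 1) mex by omega), if_pos hcase]
    simp only [lc330_finB]
    rw [if_neg (show ¬ mex * 2 ≤ n by omega), ht2e]
    norm_num
  · have h2n : mex * 2 ≤ n := by omega
    have ht2d : lc330_T n mex = lc330_T n (mex * 2) + 1 := lc330_T_double n mex hm h2n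
    have ht2p2 : 1 ≤ lc330_T n (mex * 2) := lc330_T_pos n (mex * 2) (by omega) h2n
    rw [if_neg hcase]
    by_cases hxc : x ≤ mex * 2
    · -- one patch reaches x : both sides continue with forB rest (mex*2+x)
      have ht1e1 : lc330_T (x - 1) mex = 1 := by
        have h := (lc330_bnd (x - 1) mex 1 hm (by omega)).2 (by rw [pow_one]; omega)
        omega
      rw [if_neg (show ¬ lc330_T n mex ≤ lc330_T (x - 1) mex by omega),
          if_neg (show ¬ mex * 2 < x by omega), ht1e1]
      norm_num
    · -- patch run length decreases by one on the doubled side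
      have ht1d : lc330_T (x - 1) mex = lc330_T (x - 1) (mex * 2) + 1 :=
        lc330_T_double (x - 1) mex hm (by omega)
      rw [if_pos (show mex * 2 < x by omega)]
      by_cases hc2 : lc330_T n mex ≤ lc330_T (x - 1) mex
      · rw [if_pos hc2, if_pos (show lc330_T n (mex * 2) ≤ lc330_T (x - 1) (mex * 2) by omega)]
        simp only [lc330_finB]
        omega
      · rw [if_neg hc2,
            if_neg (show ¬ lc330_T n (mex * 2) ≤ lc330_T (x - 1) (mex * 2) by omega)]
        have hmexeq : mex * 2 ^ lc330_T (x - 1) mex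
            = mex * 2 * 2 ^ lc330_T (x - 1) (mex * 2) := by rw [ht1d, pow_succ]; ring
        have hanseq : ans + (lc330_T (x - 1) mex : Int)
            = ans + 1 + (lc330_T (x - 1) (mex * 2) : Int) := by rw [ht1d]; push_cast; ring
        rw [hmexeq, hanseq]

-- main correspondence
theorem lc330_loop_eq (n : Int) :
    ∀ (l : List Int), (∀ x ∈ l, 0 ≤ x) →
    ∀ (k : Nat) (mex ans : Int), 1 ≤ mex → n < mex * 2 ^ k →
      lc330_loopA n (l.length + k) l mex ans = lc330_finB n (lc330_forB n l mex ans) := by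
  intro l
  induction l with
  | nil =>
    intro _ k mex ans hm hb
    simp only [List.length_nil, Nat.zero_add]
    rw [lc330_loopA_nil n k mex ans hm hb]
    rfl
  | cons x rest ih =>
    intro hnn k mex ans hm hb
    have hx : 0 ≤ x := hnn x (by simp)
    have hrest : ∀ y ∈ rest, 0 ≤ y := fun y hy => hnn y (by simp [hy])
    have hlen : ∀ j : Nat, (x :: rest).length + j = (rest.length + j) + 1 := by
      intro j; simp [List.length_cons]; omega
    induction k generalizing mex ans with
    | zero =>
      simp only [pow_zero, mul_one] at hb
      rw [hlen 0, lc330_loopA_step_cons, if_neg (by omega)]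
      simp only [lc330_forB]
      rw [if_pos hb]
      simp only [lc330_finB]
      rw [if_neg (by omega)]
    | succ k ihk =>
      by_cases hle : mex ≤ n
      · by_cases hxm : x ≤ mex
        · -- consume x : both sides move to rest with mex + x
          rw [hlen (k + 1), lc330_loopA_step_cons, if_pos hle, if_pos hxm]
          have hb2 : n < (mex + x) * 2 ^ (k + 1) := by
            have hpow : (0:Int) < 2 ^ (k + 1) := pow_pos (by norm_num) (k + 1)
            nlinarith
          rw [ih hrest (k + 1) (mex + x) ans (by omega) hb2]
          simp only [lc330_forB]
          rw [if_neg (by omega), if_neg (by omega)]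
        · -- patch : A doubles once, B's value is invariant under the doubling
          rw [hlen (k + 1), lc330_loopA_step_cons, if_pos hle, if_neg hxm]
          have hb2 : n < mex * 2 * 2 ^ k := by
            rw [mul_assoc, mul_comm 2 (2 ^ k), ← pow_succ]; exact hb
          have h1 := ihk (mex * 2) (ans + 1) (by omega) hb2
          rw [hlen k] at h1
          rw [show rest.length + (k + 1) = rest.length + k + 1 by omega, h1, ← lc330_finB_double n x rest mex ans hm hle (by omega)]
      · -- loop exit : mex > n, both sides give ans
        rw [hlen (k + 1), lc330_loopA_step_cons, if_neg hle]
        simp only [lc330_forB]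
        rw [if_pos (by omega)]
        simp only [lc330_finB]
        rw [if_neg hle]

-- when n ≤ 0 neither loop ever runs
theorem lc330_trivial (n : Int) (l : List Int) (hn : n ≤ 0) :
    lc330_loopA n (l.length + 64) l 1 0 = lc330_finB n (lc330_forB n l 1 0) := by
  cases l with
  | nil =>
    rw [show ([] : List Int).length + 64 = 63 + 1 from rfl, lc330_loopA_step_nil,
        if_neg (by omega)]
    simp only [lc330_forB, lc330_finB]
    rw [if_neg (by omega)]
  | cons x rest =>
    rw [show (x :: rest).length + 64 = (rest.length + 64) + 1 by simp [List.length_cons],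
        lc330_loopA_step_cons, if_neg (by omega)]
    simp only [lc330_forB]
    rw [if_pos (by omega)]
    simp only [lc330_finB]
    rw [if_neg (by omega)]

-- ===== VERDICT =====
theorem lc_330_spec : Claim_equal_lc_330 := by
  intro nums n hdom hpre
  unfold Spec_lc_330 lc_330 lc_330_alt
  have hfin : ∀ (s : List Int), (match lc330_forB n s 1 0 with
      | Sum.inl ans => ans
      | Sum.inr (mex, ans) =>
        if mex ≤ n then ans + (PySem.Int.bitLength (PySem.Int.floordiv n mex) : Int) else ans)
      = lc330_finB n (lc330_forB n s 1 0) := by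
    intro s; cases lc330_forB n s 1 0 with
    | inl a => rfl
    | inr p => cases p; rfl
  rw [hfin]
  rcases hpre with hn | hnn
  · exact lc330_trivial n _ hn
  · have hdn : n ≤ 2147483648 := by
      unfold Dom_lc_330 at hdom
      simp only [Bool.and_eq_true, pvDomInt, decide_eq_true_eq] at hdom
      exact hdom.2.2
    exact lc330_loop_eq n _
      (fun x hx => hnn x ((PySem.List.mem_sorted _ _ _ _).1 hx)) 64 1 0 (by omega)
      (by norm_num; omega)
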